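-- pv_equiv track=rewrite | github.com/stjchang/CODE2CAREER | pset1/ransom.py | ransom
-- ===== SOURCE A (Python) =====
-- from collections import Counter
--
-- def ransom(ransom_note, magazine) -> bool:
--     # more letters needed than you have
--     if len(ransom_note) > len(magazine): return False
--
--     letterCount = Counter(magazine.replace(" ", ""))
--
--     for c in ransom_note.replace(" ", ""):
--         if letterCount[c] == 0:
--             return False
--
--         letterCount[c] -= 1
--
--     return True
-- ===== SOURCE B (Python) =====
-- def ransom(ransom_note, magazine) -> bool:
--     # more letters needed than you have (spaces-inclusive length guard, as in the original)
--     if len(ransom_note) > len(magazine): return False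
--     need = sorted(ransom_note.replace(" ", ""))
--     have = sorted(magazine.replace(" ", ""))
--     # sorted two-pointer merge: each needed letter must be met in order
--     i = j = 0
--     while i < len(need) and j < len(have):
--         if need[i] == have[j]:
--             i += 1
--             j += 1
--         elif have[j] < need[i]:
--             j += 1
--         else:
--             # need[i] < have[j]: need[i] can never appear later in sorted 'have'
--             return False
--     return i == len(need)
-- ===== Notes on version B (the rewrite author's own statement) =====
-- stated objective: alternative
-- what changed: B replaces counting entirely: it sorts both de-spaced strings and runs a two-pointer merge scan over the two sorted character lists, instead of building a Counter of the magazine and decrementing it per note character.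
import Mathlib
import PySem

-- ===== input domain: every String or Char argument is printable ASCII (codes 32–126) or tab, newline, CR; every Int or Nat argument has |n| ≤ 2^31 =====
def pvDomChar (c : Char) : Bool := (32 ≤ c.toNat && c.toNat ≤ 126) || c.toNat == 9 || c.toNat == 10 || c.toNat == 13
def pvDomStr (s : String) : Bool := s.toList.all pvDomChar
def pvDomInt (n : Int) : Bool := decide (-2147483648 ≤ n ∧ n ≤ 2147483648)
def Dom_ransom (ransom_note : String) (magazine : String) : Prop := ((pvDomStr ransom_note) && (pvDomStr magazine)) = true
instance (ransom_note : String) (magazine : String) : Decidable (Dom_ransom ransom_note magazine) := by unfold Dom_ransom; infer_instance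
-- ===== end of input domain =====

-- B drops the Counter entirely: it sorts both de-spaced strings and runs a two-pointer merge scan (alternative algorithm, same guard).

-- ===== PORT A =====
-- A's streaming loop: decrement one Counter, early return on a missing letter
def ransomLoopA (d : PySem.Dict Char Int) : List Char → Bool
  | [] => true
  | c :: rest =>
    if d.getD c 0 == 0 then false
    else ransomLoopA (d.insert c (d.getD c 0 - 1)) rest

def ransom (ransom_note : String) (magazine : String) : Bool :=
  if PySem.Str.len ransom_note > PySem.Str.len magazine then false
  else
    ransomLoopA (PySem.Dict.counter (PySem.Str.replace magazine " " "").toList)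
      (PySem.Str.replace ransom_note " " "").toList

-- ===== PORT B =====
-- B's while loop over the two sorted lists, as structural recursion on the same two pointers
def ransomScanB : List Char → List Char → Bool
  | [], _ => true                    -- i == len(need): all needed letters matched
  | _ :: _, [] => false              -- have exhausted, need left: i ≠ len(need)
  | n :: ns, h :: hs =>
    if n = h then ransomScanB ns hs
    else if h < n then ransomScanB (n :: ns) hs
    else false
  termination_by _ hs => hs.length

def ransom_alt (ransom_note : String) (magazine : String) : Bool :=
  if PySem.Str.len ransom_note > PySem.Str.len magazine then false
  else
    let need := PySem.List.sorted (PySem.Str.replace ransom_note " " "").toList (fun c => c) false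
    let haveL := PySem.List.sorted (PySem.Str.replace magazine " " "").toList (fun c => c) false
    ransomScanB need haveL

-- ===== PRECONDITION & SPEC =====
def Spec_ransom (ransom_note : String) (magazine : String) (out : Bool) : Prop := out = ransom_alt ransom_note magazine
instance (ransom_note : String) (magazine : String) (out : Bool) : Decidable (Spec_ransom ransom_note magazine out) := by unfold Spec_ransom; infer_instance

-- ===== CLAIM (what is proved, stated in full; the proofs are below) =====
def Claim_equal_ransom : Prop := ∀ (ransom_note : String) (magazine : String), Dom_ransom ransom_note magazine → Spec_ransom ransom_note magazine (ransom ransom_note magazine)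

-- ===== LEMMAS AND PROOFS =====

-- A's loop succeeds iff every letter's multiplicity in the remaining note is covered by the dict
lemma loopA_iff (L : List Char) : ∀ (d : PySem.Dict Char Int), (∀ c, 0 ≤ d.getD c 0) →
    (ransomLoopA d L = true ↔ ∀ c, (L.count c : Int) ≤ d.getD c 0) := by
  induction L with
  | nil =>
    intro d hpos
    simp [ransomLoopA]
    intro c; simpa using hpos c
  | cons c rest ih =>
    intro d hpos
    by_cases h0 : d.getD c 0 = 0
    · have hfalse : ransomLoopA d (c :: rest) = false := by simp [ransomLoopA, h0]
      rw [hfalse]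
      simp only [Bool.false_eq_true, false_iff]
      intro hall
      have hc := hall c
      have e1 : (c :: rest).count c = rest.count c + 1 := List.count_cons_self
      omega
    · have hstep : ransomLoopA d (c :: rest) = ransomLoopA (d.insert c (d.getD c 0 - 1)) rest := by
        simp [ransomLoopA, h0]
      have hpos' : ∀ x, 0 ≤ (d.insert c (d.getD c 0 - 1)).getD x 0 := by
        intro x
        rw [PySem.Dict.getD_insert]
        split_ifs with hx
        · have := hpos c; omega
        · exact hpos x
      rw [hstep, ih _ hpos']
      constructor
      · intro h x
        have hx := h x
        rw [PySem.Dict.getD_insert] at hx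
        rcases eq_or_ne x c with rfl | hne
        · rw [if_pos rfl] at hx
          have e1 : (x :: rest).count x = rest.count x + 1 := List.count_cons_self
          omega
        · rw [if_neg hne] at hx
          have e1 : (c :: rest).count x = rest.count x := List.count_cons_of_ne hne.symm
          omega
      · intro h x
        have hx := h x
        rw [PySem.Dict.getD_insert]
        rcases eq_or_ne x c with rfl | hne
        · rw [if_pos rfl]
          have e1 : (x :: rest).count x = rest.count x + 1 := List.count_cons_self
          omega
        · rw [if_neg hne]
          have e1 : (c :: rest).count x = rest.count x := List.count_cons_of_ne hne.symm
          omega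

-- B's merge scan over sorted lists decides exactly the multiset-inclusion condition
lemma scanB_iff : ∀ (hs ns : List Char), ns.Pairwise (· ≤ ·) → hs.Pairwise (· ≤ ·) →
    (ransomScanB ns hs = true ↔ ∀ c, ns.count c ≤ hs.count c) := by
  intro hs
  induction hs with
  | nil =>
    intro ns _ _
    cases ns with
    | nil => simp [ransomScanB]
    | cons n ns' =>
      simp only [ransomScanB, Bool.false_eq_true, false_iff]
      intro hall
      have := hall n
      have e1 : (n :: ns').count n = ns'.count n + 1 := List.count_cons_self
      simp_all
  | cons h hs' ih =>
    intro ns hns hhs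
    cases ns with
    | nil => simp [ransomScanB]
    | cons n ns' =>
      rcases List.pairwise_cons.mp hns with ⟨hnall, hns'⟩
      rcases List.pairwise_cons.mp hhs with ⟨hhall, hhs'⟩
      by_cases heq : n = h
      · subst heq
        have hstep : ransomScanB (n :: ns') (n :: hs') = ransomScanB ns' hs' := by
          simp [ransomScanB]
        rw [hstep, ih ns' hns' hhs']
        constructor
        · intro hcov c
          have := hcov c
          rcases eq_or_ne c n with rfl | hne
          · simp only [List.count_cons_self]; omega
          · simpa [List.count_cons_of_ne hne.symm] using this
        · intro hcov c
          have := hcov c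
          rcases eq_or_ne c n with rfl | hne
          · simp only [List.count_cons_self] at this; omega
          · simpa [List.count_cons_of_ne hne.symm] using this
      · by_cases hlt : h < n
        · have hstep : ransomScanB (n :: ns') (h :: hs') = ransomScanB (n :: ns') hs' := by
            simp [ransomScanB, heq, hlt]
          rw [hstep, ih (n :: ns') hns hhs']
          have hnotin : h ∉ n :: ns' := by
            intro hmem
            rcases List.mem_cons.mp hmem with rfl | hmem'
            · exact absurd hlt (lt_irrefl _)
            · exact absurd hlt (not_lt.mpr (hnall h hmem'))
          have hcnt0 : (n :: ns').count h = 0 := List.count_eq_zero.mpr hnotin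
          constructor
          · intro hcov c
            have := hcov c
            rcases eq_or_ne c h with rfl | hne
            · simp only [List.count_cons_self]; omega
            · simpa [List.count_cons_of_ne hne.symm] using this
          · intro hcov c
            have := hcov c
            rcases eq_or_ne c h with rfl | hne
            · omega
            · simpa [List.count_cons_of_ne hne.symm] using this
        · have hgt : n < h := lt_of_le_of_ne (not_lt.mp hlt) heq
          have hstep : ransomScanB (n :: ns') (h :: hs') = false := by
            simp [ransomScanB, heq, hlt]
          rw [hstep]
          simp only [Bool.false_eq_true, false_iff]
          intro hcov
          have hnotin : n ∉ h :: hs' := by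
            intro hmem
            rcases List.mem_cons.mp hmem with rfl | hmem'
            · exact absurd hgt (lt_irrefl _)
            · exact absurd hgt (not_lt.mpr (hhall n hmem'))
          have h0 : (h :: hs').count n = 0 := List.count_eq_zero.mpr hnotin
          have h1 : (n :: ns').count n = ns'.count n + 1 := List.count_cons_self
          have := hcov n
          omega

-- ===== VERDICT (by name: the statement is the Claim_ definition above) =====
theorem ransom_spec : Claim_equal_ransom := by
  intro note mag _
  unfold Spec_ransom ransom ransom_alt
  by_cases hlen : PySem.Str.len note > PySem.Str.len mag
  · rw [if_pos hlen, if_pos hlen]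
  · rw [if_neg hlen, if_neg hlen]
    set L := (PySem.Str.replace note " " "").toList with hL
    set M := (PySem.Str.replace mag " " "").toList with hM
    have hpos : ∀ c, 0 ≤ (PySem.Dict.counter M).getD c 0 := by
      intro c; rw [PySem.Dict.getD_counter]; positivity
    have hA := loopA_iff L (PySem.Dict.counter M) hpos
    have hsortN : (PySem.List.sorted L (fun c => c) false).Pairwise (· ≤ ·) :=
      PySem.List.sorted_pairwise L (fun c => c)
    have hsortM : (PySem.List.sorted M (fun c => c) false).Pairwise (· ≤ ·) :=
      PySem.List.sorted_pairwise M (fun c => c)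
    have hB := scanB_iff (PySem.List.sorted M (fun c => c) false)
      (PySem.List.sorted L (fun c => c) false) hsortN hsortM
    have hcntL : ∀ c, (PySem.List.sorted L (fun c => c) false).count c = L.count c :=
      fun c => (PySem.List.sorted_perm L (fun c => c) false).count_eq c
    have hcntM : ∀ c, (PySem.List.sorted M (fun c => c) false).count c = M.count c :=
      fun c => (PySem.List.sorted_perm M (fun c => c) false).count_eq c
    have hsame : (∀ c, (L.count c : Int) ≤ (PySem.Dict.counter M).getD c 0) ↔
        (∀ c, (PySem.List.sorted L (fun c => c) false).count c
            ≤ (PySem.List.sorted M (fun c => c) false).count c) := by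
      constructor
      · intro h c
        have := h c
        rw [PySem.Dict.getD_counter] at this
        rw [hcntL c, hcntM c]
        exact_mod_cast this
      · intro h c
        have := h c
        rw [hcntL c, hcntM c] at this
        rw [PySem.Dict.getD_counter]
        exact_mod_cast this
    by_cases h : ∀ c, (L.count c : Int) ≤ (PySem.Dict.counter M).getD c 0
    · rw [hA.mpr h, hB.mpr (hsame.mp h)]
    · have a1 : ransomLoopA (PySem.Dict.counter M) L ≠ true := fun ht => h (hA.mp ht)
      have b1 : ransomScanB (PySem.List.sorted L (fun c => c) false)
          (PySem.List.sorted M (fun c => c) false) ≠ true :=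
        fun ht => h (hsame.mpr (hB.mp ht))
      simp only [Bool.not_eq_true] at a1 b1
      rw [a1, b1]
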